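-- pv_equiv track=rewrite | github.com/kaanunsel/python_codes | Too Many Twos.py | v2
-- ===== SOURCE A (Python) =====
-- def v2(n):
--     abs_n = abs(n)
--     r = 0
--     list_r = []
--     while(2**r <= abs_n):
--         if((n % (2**r)) == 0):
--             list_r.append(r)
--         r += 1
--     return max(list_r)
-- ===== SOURCE B (Python) =====
-- def v2(n):
--     n = abs(n)
--     r = 0
--     while n % 2 == 0:
--         n //= 2
--         r += 1
--     return r
-- ===== Notes on version B (the rewrite author's own statement) =====
-- stated objective: simpler
-- what changed: Instead of testing every power 2**r up to |n| and taking max of the collected list, B strips factors of 2 from |n| one halving at a time and counts them.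
import Mathlib
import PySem

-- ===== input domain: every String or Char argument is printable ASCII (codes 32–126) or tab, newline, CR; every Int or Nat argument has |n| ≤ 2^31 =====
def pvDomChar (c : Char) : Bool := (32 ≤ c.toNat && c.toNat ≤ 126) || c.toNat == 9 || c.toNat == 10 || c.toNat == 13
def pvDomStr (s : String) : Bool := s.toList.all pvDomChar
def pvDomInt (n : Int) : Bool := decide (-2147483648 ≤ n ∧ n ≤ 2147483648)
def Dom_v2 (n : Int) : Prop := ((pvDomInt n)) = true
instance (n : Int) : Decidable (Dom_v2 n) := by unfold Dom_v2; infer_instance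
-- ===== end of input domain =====

-- B strips factors of 2 from |n| one halving at a time instead of testing every power 2**r ≤ |n|; return value only, A mutates nothing.

-- ===== PORT A =====
-- while 2**r <= abs_n: if n % 2**r == 0: list_r.append(r); r += 1
def v2Loop (n absn : Int) (r : Nat) (listr : List Int) : List Int :=
  if (2:Int)^r ≤ absn then
    v2Loop n absn (r+1) (if PySem.Int.mod n ((2:Int)^r) = 0 then listr ++ [(r:Int)] else listr)
  else listr
termination_by (absn + 1 - 2^r).toNat
decreasing_by
  have h1 : (0:Int) < 2^r := by positivity
  have _h2 : (2:Int)^(r+1) = 2 * 2^r := by ring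
  omega


def v2 (n : Int) : Int :=
  -- max(list_r): Python raises ValueError on the empty list (n = 0); 0 in that branch is junk, excluded by Pre_v2
  (PySem.List.max? (v2Loop n |n| 0 []) (fun x => x)).getD 0

-- ===== PORT B =====
-- while n % 2 == 0: n //= 2; r += 1  — here n is abs(n) ≥ 0, tracked as a Nat (Python's % and // on nonnegative ints
-- coincide with Nat.mod / Nat.div); the `m ≠ 0` conjunct is only a totality guard: at m = 0 the Python loop diverges
-- (outside Pre_v2, nothing is claimed there)
def stripTwos (m : Nat) (r : Int) : Int :=
  if m % 2 = 0 ∧ m ≠ 0 then stripTwos (m / 2) (r + 1) else r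
termination_by m
decreasing_by omega

def v2_alt (n : Int) : Int := stripTwos n.natAbs 0

-- ===== PRECONDITION & SPEC =====
-- Pre_v2 excludes only n = 0, where A raises ValueError (max of the empty list) and B's loop does not terminate
def Pre_v2 (n : Int) : Prop := n ≠ 0
instance (n : Int) : Decidable (Pre_v2 n) := by unfold Pre_v2; infer_instance
def pvWitness_v2 : Int := 12

def Spec_v2 (n : Int) (out : Int) : Prop := out = v2_alt n
instance (n : Int) (out : Int) : Decidable (Spec_v2 n out) := by unfold Spec_v2; infer_instance

-- ===== CLAIM (what is proved, stated in full; the proofs are below) =====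
def Claim_equal_v2 : Prop := ∀ (n : Int), Dom_v2 n → Pre_v2 n → Spec_v2 n (v2 n)

-- ===== LEMMAS AND PROOFS =====

-- B computes r + (2-adic valuation)
theorem stripTwos_eq (m : Nat) (hm : m ≠ 0) (r : Int) :
    stripTwos m r = r + (padicValNat 2 m : Int) := by
  induction m using Nat.strong_induction_on generalizing r with
  | _ m ih =>
    rw [stripTwos]
    by_cases h2 : m % 2 = 0
    · have hm2 : m / 2 ≠ 0 := by omega
      have hlt : m / 2 < m := by omega
      rw [if_pos ⟨h2, hm⟩, ih _ hlt hm2 (r + 1)]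
      have hmul : m = 2 * (m / 2) := by omega
      have : padicValNat 2 m = padicValNat 2 (m / 2) + 1 := by
        conv_lhs => rw [hmul]
        rw [padicValNat.mul (p := 2) (by norm_num) hm2, padicValNat.self (by norm_num)]
        omega
      rw [this]; push_cast; ring
    · rw [if_neg (by tauto)]
      have : padicValNat 2 m = 0 := padicValNat.eq_zero_of_not_dvd (by omega)
      rw [this]; simp

-- divisibility in A's test, over Int, reduced to Nat
theorem int_pow_dvd_iff (n : Int) (j : Nat) : (2:Int)^j ∣ n ↔ 2^j ∣ n.natAbs := by
  rw [← Int.natAbs_dvd_natAbs]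
  simp [Int.natAbs_pow]

-- accumulator monotonicity: everything already collected stays in the result
theorem mem_v2Loop_of_mem (n absn : Int) (r : Nat) (acc : List Int) (x : Int) (hx : x ∈ acc) :
    x ∈ v2Loop n absn r acc := by
  fun_induction v2Loop n absn r acc with
  | case1 r acc hc ih => exact ih (by split <;> simp [hx])
  | case2 r acc hc => exact hx

-- every element of the result is from acc or is some j with 2^j ∣ n
theorem mem_v2Loop (n absn : Int) (r : Nat) (acc : List Int) (x : Int)
    (hx : x ∈ v2Loop n absn r acc) :
    x ∈ acc ∨ ∃ j : Nat, x = (j:Int) ∧ (2:Int)^j ∣ n := by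
  fun_induction v2Loop n absn r acc with
  | case1 r acc hc ih =>
    rcases ih hx with h | h
    · split at h
      · rename_i hd
        rcases List.mem_append.1 h with h' | h'
        · exact Or.inl h'
        · refine Or.inr ⟨r, List.mem_singleton.1 h', ?_⟩
          exact (PySem.Int.mod_eq_zero_iff_dvd n _).1 hd
      · exact Or.inl h
    · exact Or.inr h
  | case2 r acc hc => exact Or.inl hx

-- reaching r = v: the valuation itself is appended
theorem val_mem_v2Loop (n : Int) (hn : n ≠ 0) (r : Nat) (acc : List Int)
    (hr : r ≤ padicValNat 2 n.natAbs) :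
    ((padicValNat 2 n.natAbs : Nat) : Int) ∈ v2Loop n |n| r acc := by
  have hm : n.natAbs ≠ 0 := by omega
  set v := padicValNat 2 n.natAbs with hv
  have hvd : 2^v ∣ n.natAbs := pow_padicValNat_dvd
  have hvle : (2:Int)^v ≤ |n| := by
    have := Nat.le_of_dvd (by omega) hvd
    calc (2:Int)^v = ((2^v : Nat) : Int) := by push_cast; ring
    _ ≤ (n.natAbs : Int) := by exact_mod_cast this
    _ = |n| := (Int.abs_eq_natAbs n).symm
  induction hd : v - r generalizing r acc with
  | zero =>
    have hrv : r = v := by omega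
    subst hrv
    rw [v2Loop, if_pos hvle, if_pos (by
      exact (PySem.Int.mod_eq_zero_iff_dvd n _).2 ((int_pow_dvd_iff n v).2 hvd))]
    exact mem_v2Loop_of_mem _ _ _ _ _ (by simp)
  | succ k ih =>
    have hrle : (2:Int)^r ≤ |n| := le_trans (by
      exact pow_le_pow_right₀ (by norm_num) (by omega)) hvle
    rw [v2Loop, if_pos hrle]
    exact ih (r+1) _ (by omega) (by omega)

-- no element of the result exceeds the valuation
theorem v2Loop_le_val (n : Int) (hn : n ≠ 0) (x : Int) (hx : x ∈ v2Loop n |n| 0 []) :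
    x ≤ ((padicValNat 2 n.natAbs : Nat) : Int) := by
  have hm : n.natAbs ≠ 0 := by omega
  rcases mem_v2Loop n |n| 0 [] x hx with h | ⟨j, rfl, hdvd⟩
  · simp at h
  · have hj : 2^j ∣ n.natAbs := (int_pow_dvd_iff n j).1 hdvd
    by_contra hgt
    have hlt : ((padicValNat 2 n.natAbs : Nat) : Int) < (j:Int) := not_le.1 hgt
    have hjv : padicValNat 2 n.natAbs + 1 ≤ j := by exact_mod_cast hlt
    exact pow_succ_padicValNat_not_dvd hm (dvd_trans (pow_dvd_pow 2 hjv) hj)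

-- ===== VERDICT (by name: the statement is the Claim_ definition above) =====
theorem v2_spec : Claim_equal_v2 := by
  intro n _ hn
  have hn' : n ≠ 0 := hn
  unfold Spec_v2 v2 v2_alt
  rw [stripTwos_eq n.natAbs (by omega) 0]
  set v := padicValNat 2 n.natAbs with hv
  have hmem := val_mem_v2Loop n hn' 0 [] (Nat.zero_le _)
  cases hmax : PySem.List.max? (v2Loop n |n| 0 []) (fun x => x) with
  | none =>
    exact absurd ((PySem.List.max?_eq_none_iff _ _).1 hmax ▸ hmem) (List.not_mem_nil)
  | some m =>
    have h1 : m ∈ v2Loop n |n| 0 [] := PySem.List.max?_mem hmax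
    have h2 : (v : Int) ≤ m := PySem.List.max?_isMax hmax _ hmem
    have h3 : m ≤ (v : Int) := v2Loop_le_val n hn' m h1
    simp [le_antisymm h3 h2]
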